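-- pv_equiv track=rewrite | github.com/Hakeem-ds/AutoCataloguing | ac_pipe/utils/label_normalisation.py | resolve_hierarchical_sys_id
-- ===== SOURCE A (Python) =====
-- from typing import Any, Optional
--
-- def resolve_hierarchical_sys_id(raw_sys_id: str, valid_folders: set[str]) -> Optional[str]:
--     """
--     Given a SYSID like "A/B/C/D/E/F", progressively try
--     A/B/C/D/E/F, A/B/C/D/E, ..., A/B, A.
--     Return the first match in `valid_folders`, or None.
--     """
--     if not isinstance(raw_sys_id, str):
--         return None
--     parts = raw_sys_id.split("/")
--     for i in range(len(parts), 0, -1):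
--         candidate = "/".join(parts[:i])
--         if candidate in valid_folders:
--             return candidate
--     return None
-- ===== SOURCE B (Python) =====
-- from typing import Any, Optional
--
-- def resolve_hierarchical_sys_id(raw_sys_id: str, valid_folders: set[str]) -> Optional[str]:
--     """Scan valid_folders once, keeping the folder whose '/'-components form the
--     longest exact component-wise prefix of raw_sys_id's components."""
--     if not isinstance(raw_sys_id, str):
--         return None
--     raw_parts = raw_sys_id.split("/")
--     best = None
--     best_n = 0
--     for folder in valid_folders:
--         folder_parts = folder.split("/")
--         n = len(folder_parts)
--         if n > best_n and folder_parts == raw_parts[:n]: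
--             best, best_n = folder, n
--     return best
-- ===== Notes on version B (the rewrite author's own statement) =====
-- stated objective: alternative
-- what changed: Instead of generating each prefix candidate (longest first) and testing set membership, B splits every valid folder once and does a single scan over valid_folders keeping the folder whose components form the longest exact component-wise prefix of the raw id.
import Mathlib
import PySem

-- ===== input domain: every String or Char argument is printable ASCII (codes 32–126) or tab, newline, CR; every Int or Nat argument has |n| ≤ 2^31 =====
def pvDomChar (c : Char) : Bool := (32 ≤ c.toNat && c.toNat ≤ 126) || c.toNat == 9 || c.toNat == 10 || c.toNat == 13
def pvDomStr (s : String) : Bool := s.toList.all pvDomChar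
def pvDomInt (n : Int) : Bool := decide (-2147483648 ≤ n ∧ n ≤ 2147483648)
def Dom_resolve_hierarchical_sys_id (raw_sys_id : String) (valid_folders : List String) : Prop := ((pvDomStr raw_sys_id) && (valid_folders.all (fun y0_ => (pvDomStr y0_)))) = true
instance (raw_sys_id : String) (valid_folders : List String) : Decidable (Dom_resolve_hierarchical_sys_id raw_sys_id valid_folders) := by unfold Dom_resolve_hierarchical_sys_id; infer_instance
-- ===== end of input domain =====

-- B replaces A's longest-first candidate generation + membership tests by a single scan of
-- valid_folders keeping the longest component-wise prefix match (alternative decomposition, not claimed faster).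

-- shared primitive port of s.split("/") (sep "/" is nonempty, so Python's split never raises)
def pvSplit (s : String) : List String :=
  (PySem.Chars.splitOn s.toList ['/']).map String.ofList

-- ===== PORT A =====
-- 'if not isinstance(raw_sys_id, str): return None' — raw_sys_id : String here, so the guard never fires
def resolve_hierarchical_sys_id (raw_sys_id : String) (valid_folders : List String) : Option String :=
  let parts := pvSplit raw_sys_id
  (PySem.List.pyRange (parts.length : Int) 0 (-1)).foldl
    (fun acc i =>
      match acc with
      | some r => some r
      | none =>
        let candidate := PySem.Str.join "/" (PySem.List.slice parts none (some i))
        if valid_folders.contains candidate then some candidate else none)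
    none

-- ===== PORT B =====
def resolve_hierarchical_sys_id_alt (raw_sys_id : String) (valid_folders : List String) : Option String :=
  let raw_parts := pvSplit raw_sys_id
  (valid_folders.foldl
    (fun best folder =>
      let folder_parts := pvSplit folder
      let n := folder_parts.length
      if n > best.2 ∧ folder_parts = raw_parts.take n then (some folder, n) else best)
    ((none : Option String), 0)).1

-- ===== PRECONDITION & SPEC =====
def Spec_resolve_hierarchical_sys_id (raw_sys_id : String) (valid_folders : List String) (out : Option String) : Prop := out = resolve_hierarchical_sys_id_alt raw_sys_id valid_folders
instance (raw_sys_id : String) (valid_folders : List String) (out : Option String) : Decidable (Spec_resolve_hierarchical_sys_id raw_sys_id valid_folders out) := by unfold Spec_resolve_hierarchical_sys_id; infer_instance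

-- ===== CLAIM (what is proved, stated in full; the proofs are below) =====
def Claim_equal_resolve_hierarchical_sys_id : Prop := ∀ (raw_sys_id : String) (valid_folders : List String), Dom_resolve_hierarchical_sys_id raw_sys_id valid_folders → Spec_resolve_hierarchical_sys_id raw_sys_id valid_folders (resolve_hierarchical_sys_id raw_sys_id valid_folders)

-- ===== LEMMAS AND PROOFS =====

-- PySem.Chars.splitOn with a one-character separator is Mathlib's List.splitOn
theorem pvGo_eq (c : Char) (fuel : Nat) (l cur : List Char) (acc : List (List Char))
    (h : l.length < fuel) :
    PySem.Chars.splitOn.go [c] fuel l cur acc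
      = acc.reverse ++ (List.splitOnP (· == c) l).modifyHead (cur.reverse ++ ·) := by
  induction fuel generalizing l cur acc with
  | zero => omega
  | succ f ih =>
    cases l with
    | nil => simp [PySem.Chars.splitOn.go, List.splitOnP_nil]
    | cons x rest =>
      by_cases hx : x = c
      · subst hx
        simp only [PySem.Chars.splitOn.go, List.isPrefixOf, BEq.rfl, Bool.true_and, if_pos]
        rw [ih _ _ _ (by simpa using Nat.lt_of_succ_lt_succ h)]
        rw [List.splitOnP_cons]
        simp only [BEq.rfl, if_pos]
        rw [show (fun x : List Char => [].reverse ++ x) = id from by funext z; simp, List.modifyHead_id]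
        simp
      · simp only [PySem.Chars.splitOn.go]
        rw [if_neg (by simp [List.isPrefixOf]; exact Ne.symm hx)]
        rw [ih _ _ _ (by simpa using Nat.lt_of_succ_lt_succ h)]
        rw [List.splitOnP_cons, if_neg (by simp [hx])]
        cases hsp : List.splitOnP (· == c) rest with
        | nil => exact absurd hsp (List.splitOnP_ne_nil _ _)
        | cons a t => simp

theorem pvChars_splitOn_eq (c : Char) (cs : List Char) :
    PySem.Chars.splitOn cs [c] = List.splitOn c cs := by
  rw [PySem.Chars.splitOn, pvGo_eq c _ _ _ _ (by omega)]
  cases hsp : List.splitOnP (· == c) cs with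
  | nil => exact absurd hsp (List.splitOnP_ne_nil _ _)
  | cons a t => simp [List.splitOn, hsp]

-- pieces of a split never contain the separator
theorem pvNotMem_splitOn (c : Char) (cs : List Char) :
    ∀ l ∈ List.splitOn c cs, c ∉ l := by
  have key : ∀ (p : Char → Bool) (cs : List Char), ∀ l ∈ List.splitOnP p cs, ∀ x ∈ l, ¬ p x := by
    intro p cs
    induction cs with
    | nil => simp [List.splitOnP_nil]
    | cons y rest ih =>
      intro l hl x hx
      rw [List.splitOnP_cons] at hl
      by_cases hy : p y
      · rw [if_pos hy] at hl
        rcases List.mem_cons.1 hl with hl | hl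
        · subst hl; simp at hx
        · exact ih l hl x hx
      · rw [if_neg (by simpa using hy)] at hl
        cases hsp : List.splitOnP p rest with
        | nil => exact absurd hsp (List.splitOnP_ne_nil _ _)
        | cons a t =>
          rw [hsp] at hl
          simp only [List.modifyHead] at hl
          rcases List.mem_cons.1 hl with hl | hl
          · subst hl
            rcases List.mem_cons.1 hx with hx | hx
            · exact hx ▸ hy
            · exact ih a (by rw [hsp]; exact List.mem_cons_self) x hx
          · exact ih l (by rw [hsp]; exact List.mem_cons_of_mem _ hl) x hx
  intro l hl hx
  exact key (· == c) cs l (by simpa [List.splitOn] using hl) c hx (by simp)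

theorem pvSplit_ne_nil (s : String) : pvSplit s ≠ [] := by
  simp only [pvSplit, pvChars_splitOn_eq, List.splitOn, ne_eq, List.map_eq_nil_iff]
  exact List.splitOnP_ne_nil _ _

-- join "/" ∘ split "/" = id
theorem pvJoin_pvSplit (f : String) : PySem.Str.join "/" (pvSplit f) = f := by
  rw [pvSplit, pvChars_splitOn_eq, PySem.Str.join, PySem.Chars.join]
  rw [List.map_map]
  simp only [Function.comp_def, String.toList_ofList, List.map_id_fun', id_eq]
  rw [show "/".toList = ['/'] from rfl, List.intercalate_splitOn]
  exact String.ofList_toList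

-- split "/" ∘ join "/" = id on nonempty lists of slash-free pieces
theorem pvSplit_pvJoin (ps : List String) (hne : ps ≠ [])
    (hns : ∀ p ∈ ps, ('/' : Char) ∉ p.toList) :
    pvSplit (PySem.Str.join "/" ps) = ps := by
  rw [pvSplit, PySem.Str.join, PySem.Chars.join, String.toList_ofList]
  rw [show "/".toList = ['/'] from rfl, pvChars_splitOn_eq]
  rw [List.splitOn_intercalate _ _ (by intro l hl; rcases List.mem_map.1 hl with ⟨p, hp, rfl⟩; exact hns p hp)
      (by simpa using hne)]
  rw [List.map_map]
  simp [Function.comp_def, String.ofList_toList]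

theorem pvSplit_noSlash (s : String) : ∀ p ∈ pvSplit s, ('/' : Char) ∉ p.toList := by
  intro p hp
  rcases List.mem_map.1 (by simpa [pvSplit, pvChars_splitOn_eq] using hp) with ⟨l, hl, rfl⟩
  rw [String.toList_ofList]
  exact pvNotMem_splitOn _ _ l hl

-- the candidate at depth k
def pvCand (P : List String) (k : Nat) : String := PySem.Str.join "/" (P.take k)

-- A's countdown loop, restated as structural recursion
def pvGoA (vf P : List String) : Nat → Option String
  | 0 => none
  | k+1 => if vf.contains (pvCand P (k+1)) then some (pvCand P (k+1)) else pvGoA vf P k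

def pvStepA (vf P : List String) (acc : Option String) (i : Int) : Option String :=
  match acc with
  | some r => some r
  | none =>
    let candidate := PySem.Str.join "/" (PySem.List.slice P none (some i))
    if vf.contains candidate then some candidate else none

theorem pvFoldA_absorb (vf P : List String) (r : String) (xs : List Int) :
    xs.foldl (pvStepA vf P) (some r) = some r := by
  induction xs with
  | nil => rfl
  | cons x t ih => simpa [pvStepA] using ih

theorem pvFoldA (vf P : List String) (k : Nat) :
    (PySem.List.pyRange (k : Int) 0 (-1)).foldl (pvStepA vf P) none = pvGoA vf P k := by
  induction k with
  | zero => rw [PySem.List.pyRange_neg_one_eq_nil (by omega)]; rfl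
  | succ m ih =>
    rw [PySem.List.pyRange_neg_one_cons (by exact_mod_cast Nat.succ_pos m)]
    have h1 : ((m + 1 : Nat) : Int) - 1 = (m : Int) := by push_cast; ring
    rw [List.foldl_cons, h1]
    have hc : pvStepA vf P none ((m + 1 : Nat) : Int)
        = if vf.contains (pvCand P (m + 1)) then some (pvCand P (m + 1)) else none := by
      show (let candidate := PySem.Str.join "/" (PySem.List.slice P none (some ((m + 1 : Nat) : Int)));
        if vf.contains candidate then some candidate else none) = _
      rw [PySem.List.slice_to P (by positivity)]
      norm_num [pvCand]
    rw [hc]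
    by_cases hb : vf.contains (pvCand P (m + 1))
    · rw [if_pos hb, pvFoldA_absorb, pvGoA, if_pos hb]
    · rw [if_neg hb, ih, pvGoA, if_neg hb]

theorem pvA_eq_goA (raw : String) (vf : List String) :
    resolve_hierarchical_sys_id raw vf = pvGoA vf (pvSplit raw) (pvSplit raw).length := by
  show (PySem.List.pyRange ((pvSplit raw).length : Int) 0 (-1)).foldl (pvStepA vf (pvSplit raw)) none = _
  exact pvFoldA vf (pvSplit raw) (pvSplit raw).length

theorem pvGoA_none (vf P : List String) (k : Nat)
    (h : ∀ j, 1 ≤ j → j ≤ k → ¬ vf.contains (pvCand P j)) : pvGoA vf P k = none := by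
  induction k with
  | zero => rfl
  | succ m ih =>
    rw [pvGoA, if_neg (h (m+1) (by omega) (by omega))]
    exact ih fun j h1 h2 => h j h1 (by omega)

theorem pvGoA_some (vf P : List String) (k m : Nat) (h1 : 1 ≤ m) (h2 : m ≤ k)
    (hm : vf.contains (pvCand P m))
    (hmax : ∀ j, m < j → j ≤ k → ¬ vf.contains (pvCand P j)) :
    pvGoA vf P k = some (pvCand P m) := by
  induction k with
  | zero => omega
  | succ n ih =>
    by_cases he : m = n + 1
    · subst he; rw [pvGoA, if_pos hm]
    · rw [pvGoA, if_neg (hmax (n+1) (by omega) (by omega))]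
      exact ih (by omega) fun j hj1 hj2 => hmax j hj1 (by omega)

-- B's fold: its step and invariant
def pvMatch (P : List String) (f : String) : Prop := pvSplit f = P.take (pvSplit f).length

def pvStep (P : List String) (best : Option String × Nat) (folder : String) : Option String × Nat :=
  if (pvSplit folder).length > best.2 ∧ pvSplit folder = P.take (pvSplit folder).length
  then (some folder, (pvSplit folder).length) else best

def pvInv (P : List String) (seen : List String) (st : Option String × Nat) : Prop :=
  (st = (none, 0) ∧ ∀ f ∈ seen, ¬ pvMatch P f) ∨
  (∃ b, st = (some b, (pvSplit b).length) ∧ b ∈ seen ∧ pvMatch P b ∧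
    ∀ f ∈ seen, pvMatch P f → (pvSplit f).length ≤ (pvSplit b).length)

theorem pvFoldB_inv (P : List String) (fs : List String) :
    ∀ seen st, pvInv P seen st → pvInv P (seen ++ fs) (fs.foldl (pvStep P) st) := by
  induction fs with
  | nil => intro seen st h; simpa using h
  | cons f rest ih =>
    intro seen st h
    have hstep : pvInv P (seen ++ [f]) (pvStep P st f) := by
      rw [pvStep]
      by_cases hc : (pvSplit f).length > st.2 ∧ pvSplit f = P.take (pvSplit f).length
      · rw [if_pos hc]
        right
        refine ⟨f, rfl, by simp, hc.2, ?_⟩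
        intro g hg hgm
        rcases List.mem_append.1 hg with hg | hg
        · rcases h with ⟨hst, hnone⟩ | ⟨b, hst, _, _, hmax⟩
          · exact absurd hgm (hnone g hg)
          · have := hmax g hg hgm
            have hb2 : st.2 = (pvSplit b).length := by rw [hst]
            omega
        · simp at hg; subst hg; exact le_refl _
      · rw [if_neg hc]
        rcases h with ⟨hst, hnone⟩ | ⟨b, hst, hb, hbm, hmax⟩
        · left
          refine ⟨hst, ?_⟩
          intro g hg
          rcases List.mem_append.1 hg with hg | hg
          · exact hnone g hg
          · simp at hg; subst hg
            intro hm
            have hpos : 0 < (pvSplit g).length := List.length_pos_of_ne_nil (pvSplit_ne_nil g)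
            have hz : st.2 = 0 := by rw [hst]
            exact hc ⟨by omega, hm⟩
        · right
          refine ⟨b, hst, List.mem_append.2 (Or.inl hb), hbm, ?_⟩
          intro g hg hgm
          rcases List.mem_append.1 hg with hg | hg
          · exact hmax g hg hgm
          · simp at hg; subst hg
            have hb2 : st.2 = (pvSplit b).length := by rw [hst]
            have hle : ¬((pvSplit g).length > st.2) := fun hgt => hc ⟨hgt, hgm⟩
            omega
    have := ih (seen ++ [f]) (pvStep P st f) hstep
    simpa [List.append_assoc] using this

theorem pvB_eq_fold (raw : String) (vf : List String) :
    resolve_hierarchical_sys_id_alt raw vf = (vf.foldl (pvStep (pvSplit raw)) (none, 0)).1 := rfl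

-- ===== VERDICT (by name: the statement is the Claim_ definition above) =====
-- for 1 ≤ j ≤ depth, the candidate at depth j splits back to the first j components
theorem pvCand_split (raw : String) (j : Nat) (h1 : 1 ≤ j) :
    pvSplit (pvCand (pvSplit raw) j) = (pvSplit raw).take j := by
  rw [pvCand]
  refine pvSplit_pvJoin _ ?_ ?_
  · intro hnil
    rcases List.take_eq_nil_iff.1 hnil with h | h
    · omega
    · exact pvSplit_ne_nil raw h
  · intro p hp
    exact pvSplit_noSlash raw p (List.take_subset _ _ hp)

theorem pvCand_match (raw : String) (j : Nat) (h1 : 1 ≤ j) (h2 : j ≤ (pvSplit raw).length) :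
    pvMatch (pvSplit raw) (pvCand (pvSplit raw) j) ∧
      (pvSplit (pvCand (pvSplit raw) j)).length = j := by
  have hs := pvCand_split raw j h1
  have hlen : (pvSplit (pvCand (pvSplit raw) j)).length = j := by
    rw [hs, List.length_take]; omega
  exact ⟨by rw [pvMatch, hlen, hs], hlen⟩

theorem resolve_hierarchical_sys_id_spec : Claim_equal_resolve_hierarchical_sys_id := by
  intro raw vf _
  show resolve_hierarchical_sys_id raw vf = resolve_hierarchical_sys_id_alt raw vf
  rw [pvA_eq_goA, pvB_eq_fold]
  have hinv := pvFoldB_inv (pvSplit raw) vf [] (none, 0) (Or.inl ⟨rfl, by simp⟩)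
  rw [List.nil_append] at hinv
  rcases hinv with ⟨hst, hnone⟩ | ⟨b, hst, hb, hbm, hmax⟩
  · rw [hst]
    apply pvGoA_none
    intro j hj1 hj2 hcon
    have hmem : pvCand (pvSplit raw) j ∈ vf := by
      rwa [List.contains_iff_mem] at hcon
    exact hnone _ hmem (pvCand_match raw j hj1 hj2).1
  · rw [hst]
    set P := pvSplit raw with hP
    have hm1 : 1 ≤ (pvSplit b).length := List.length_pos_of_ne_nil (pvSplit_ne_nil b)
    have hbm' : pvSplit b = P.take (pvSplit b).length := hbm
    have hm2 : (pvSplit b).length ≤ P.length := by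
      have := congrArg List.length hbm' 
      rw [List.length_take] at this
      omega
    have hbc : b = pvCand P (pvSplit b).length := by
      conv_lhs => rw [← pvJoin_pvSplit b]
      rw [pvCand]
      exact congrArg _ hbm' 
    rw [pvGoA_some vf P P.length (pvSplit b).length hm1 hm2
      (by rw [← hbc, List.contains_iff_mem]; exact hb)
      ?_, ← hbc]
    intro j hj1 hj2 hcon
    have hmem : pvCand P j ∈ vf := by rwa [List.contains_iff_mem] at hcon
    have hcm := pvCand_match raw j (by omega) hj2
    have := hmax _ hmem hcm.1
    rw [hcm.2] at this
    omega
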